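-- pv_equiv track=rewrite | github.com/Shilenkovv/Algorithms_PyGen_bg | 4_concept_and_analysis_of_algorithms/4_2_8.py | longest_substring_without_vowels
-- ===== SOURCE A (Python) =====
-- def longest_substring_without_vowels(s: str) -> int:
--     """Calculate the length of the longest substring without vowels.
--
--     Args:
--         s (str): Given string, which may contain vowels. 1 <= len(s) <= 10^3.
--
--     Returns:
--         int: Length of the longest substring without vowels.
--         If there are no consonants, return 0.
--         If the string is empty, return 0.
--     """
--     cur_len = 0
--     max_len = 0
--     vowels = set('aeiouAEIOU')
--     for char in s:
--         if char not in vowels: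
--             cur_len += 1
--             max_len = max(max_len, cur_len)
--         else:
--             cur_len = 0
--     return max_len
-- ===== SOURCE B (Python) =====
-- def longest_substring_without_vowels(s: str) -> int:
--     """Segment-at-a-time: measure the leading vowel-free run of the remaining
--     string, then cut it (plus the vowel after it) off, keeping the best length."""
--     best = 0
--     rest = s
--     while rest:
--         run = 0
--         while run < len(rest) and rest[run] not in "aeiouAEIOU":
--             run += 1
--         best = max(best, run)
--         rest = rest[run + 1:]
--     return best
-- ===== Notes on version B (the rewrite author's own statement) =====
-- stated objective: alternative
-- what changed: A keeps a per-character running counter and a running max in one pass; B repeatedly measures the leading vowel-free run of the remaining string, slices it (and the vowel after it) off, and keeps the best run length.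
import Mathlib
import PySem

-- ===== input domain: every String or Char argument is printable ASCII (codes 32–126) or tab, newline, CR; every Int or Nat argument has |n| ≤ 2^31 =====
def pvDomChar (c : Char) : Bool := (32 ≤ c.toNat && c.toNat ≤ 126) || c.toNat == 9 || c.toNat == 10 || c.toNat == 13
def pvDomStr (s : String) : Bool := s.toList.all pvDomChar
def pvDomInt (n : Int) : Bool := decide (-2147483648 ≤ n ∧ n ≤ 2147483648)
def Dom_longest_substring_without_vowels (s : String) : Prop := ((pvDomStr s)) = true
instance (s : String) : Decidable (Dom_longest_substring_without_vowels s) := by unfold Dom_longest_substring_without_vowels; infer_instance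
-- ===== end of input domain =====

-- B replaces A's per-character counter loop by a segment-at-a-time scan (measure the
-- leading vowel-free run, cut it and the vowel after it off, keep the best); alternative, not faster.


-- ===== PORT A =====
-- vowels = set('aeiouAEIOU'); for char in s: if char not in vowels: cur += 1; max_len = max(max_len, cur) else: cur = 0
def longest_substring_without_vowels (s : String) : Int :=
  (s.toList.foldl
    (fun (p : Int × Int) c =>
      if PySem.Set.contains (PySem.Set.ofList "aeiouAEIOU".toList) c = false
      then (p.1 + 1, max p.2 (p.1 + 1))
      else (0, p.2))
    (0, 0)).2

-- ===== PORT B =====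
-- inner while loop: length of the leading run of characters with rest[run] not in "aeiouAEIOU"
def pvRunB (rest : List Char) : Nat :=
  match rest with
  | [] => 0
  | c :: cs => if PySem.Chars.isIn [c] "aeiouAEIOU".toList then 0 else pvRunB cs + 1

-- outer while loop; rest[run + 1:] on a nonnegative index is List.drop (exact here)
def pvGoB (rest : List Char) (best : Int) : Int :=
  match h : rest with
  | [] => best
  | _ :: _ =>
    pvGoB (rest.drop (pvRunB rest + 1)) (max best (pvRunB rest))
termination_by rest.length
decreasing_by simp [h]

def longest_substring_without_vowels_alt (s : String) : Int :=
  pvGoB s.toList 0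

-- ===== PRECONDITION & SPEC =====
def Spec_longest_substring_without_vowels (s : String) (out : Int) : Prop := out = longest_substring_without_vowels_alt s
instance (s : String) (out : Int) : Decidable (Spec_longest_substring_without_vowels s out) := by unfold Spec_longest_substring_without_vowels; infer_instance

-- ===== CLAIM (what is proved, stated in full; the proofs are below) =====
def Claim_equal_longest_substring_without_vowels : Prop := ∀ (s : String), Dom_longest_substring_without_vowels s → Spec_longest_substring_without_vowels s (longest_substring_without_vowels s)

-- ===== LEMMAS AND PROOFS =====

-- the vowel test in A's form, shared by the proof-side helpers
def pvIsV (c : Char) : Bool := PySem.Set.contains (PySem.Set.ofList "aeiouAEIOU".toList) c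

-- B's membership test (char in string) agrees with A's (char in set)
lemma pvTest_eq (c : Char) :
    PySem.Chars.isIn [c] "aeiouAEIOU".toList = pvIsV c := by
  have h1 : PySem.Chars.isIn [c] "aeiouAEIOU".toList = true ↔ c ∈ "aeiouAEIOU".toList := by
    rw [PySem.Chars.isIn_iff_infix, List.singleton_infix_iff]
  have h2 : pvIsV c = true ↔ c ∈ "aeiouAEIOU".toList := by
    simp [pvIsV, PySem.Set.contains]
  rw [Bool.eq_iff_iff, h1, h2]

-- the common value: best run length in cs, given cur = length of the run currently open
def pvH (cur : Int) : List Char → Int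
  | [] => 0
  | c :: cs => if pvIsV c then pvH 0 cs else max (cur + 1) (pvH (cur + 1) cs)

lemma pvH_nonneg (cs : List Char) (cur : Int) : 0 ≤ pvH cur cs := by
  induction cs generalizing cur with
  | nil => simp [pvH]
  | cons c cs ih =>
    by_cases h : pvIsV c = true <;> simp [pvH, h]
    · exact ih 0
    · exact Or.inr (ih (cur + 1))

-- A's loop computes pvH
lemma pvFoldA (cs : List Char) (cur mx : Int) (hc : 0 ≤ cur) (hm : 0 ≤ mx) :
    (cs.foldl
      (fun (p : Int × Int) c =>
        if PySem.Set.contains (PySem.Set.ofList "aeiouAEIOU".toList) c = false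
        then (p.1 + 1, max p.2 (p.1 + 1)) else (0, p.2))
      (cur, mx)).2 = max mx (pvH cur cs) := by
  induction cs generalizing cur mx with
  | nil => simp [pvH]; omega
  | cons c cs ih =>
    simp only [List.foldl_cons]
    by_cases h : pvIsV c = true
    · have hb := h
      simp only [pvIsV] at hb
      simp only [hb, Bool.true_eq_false, if_false, pvH, h, if_true]
      exact ih 0 mx le_rfl hm
    · have hb : PySem.Set.contains (PySem.Set.ofList "aeiouAEIOU".toList) c = false := by
        simpa [pvIsV] using h
      simp only [hb, if_true, pvH, h, Bool.false_eq_true, if_false]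
      rw [ih (cur + 1) (max mx (cur + 1)) (by omega) (by omega)]
      omega

lemma pvK2 (cs : List Char) (k : Int) :
    max (k + 1) (pvH (k + 1) cs) =
      max (k + 1 + pvRunB cs) (pvH 0 (cs.drop (pvRunB cs + 1))) := by
  induction cs generalizing k with
  | nil => simp [pvRunB, pvH]
  | cons c cs ih =>
    rw [pvRunB, pvTest_eq]
    by_cases h : pvIsV c = true
    · simp [pvH, h]
    · simp only [h, Bool.false_eq_true, if_false, pvH]
      have := ih (k + 1)
      have hdrop : (c :: cs).drop (pvRunB cs + 1 + 1) = cs.drop (pvRunB cs + 1) := rfl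
      push_cast at this ⊢
      rw [hdrop]
      omega

-- one segment step of B preserves pvH 0
lemma pvK (cs : List Char) :
    pvH 0 cs = max ((pvRunB cs : Int)) (pvH 0 (cs.drop (pvRunB cs + 1))) := by
  cases cs with
  | nil => simp [pvRunB, pvH]
  | cons c cs =>
    rw [pvRunB, pvTest_eq]
    by_cases h : pvIsV c = true
    · simp only [h, if_true, pvH]
      have hd : (c :: cs).drop ((0:Nat) + 1) = cs := rfl
      rw [hd]
      have := pvH_nonneg cs 0
      push_cast
      omega
    · simp only [h, Bool.false_eq_true, if_false, pvH]
      have := pvK2 cs 0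
      have hdrop : (c :: cs).drop (pvRunB cs + 1 + 1) = cs.drop (pvRunB cs + 1) := rfl
      push_cast at this ⊢
      rw [hdrop]
      omega

lemma pvGoB_nil (best : Int) : pvGoB [] best = best := by rw [pvGoB.eq_def]

lemma pvGoB_cons (c : Char) (cs : List Char) (best : Int) :
    pvGoB (c :: cs) best = pvGoB ((c :: cs).drop (pvRunB (c :: cs) + 1)) (max best (pvRunB (c :: cs))) := by
  rw [pvGoB.eq_def]

-- B's outer loop computes pvH (fuel = an upper bound on the length, for the strong induction)
lemma pvGoB_eq (n : Nat) : ∀ (cs : List Char), cs.length ≤ n → ∀ (best : Int), 0 ≤ best →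
    pvGoB cs best = max best (pvH 0 cs) := by
  induction n with
  | zero =>
    intro cs hlen best hb
    have : cs = [] := List.eq_nil_of_length_eq_zero (Nat.le_zero.mp hlen)
    subst this
    rw [pvGoB_nil]
    simp [pvH]
    omega
  | succ n ih =>
    intro cs hlen best hb
    cases cs with
    | nil => rw [pvGoB_nil]; simp [pvH]; omega
    | cons c cs' =>
      rw [pvGoB_cons]
      have hlen' : ((c :: cs').drop (pvRunB (c :: cs') + 1)).length ≤ n := by
        rw [List.length_drop, List.length_cons]
        simp only [List.length_cons] at hlen
        omega
      rw [ih _ hlen' _ (by omega)]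
      rw [pvK (c :: cs')]
      omega

-- ===== VERDICT (by name: the statement is the Claim_ definition above) =====
theorem longest_substring_without_vowels_spec : Claim_equal_longest_substring_without_vowels := by
  intro s _
  unfold Spec_longest_substring_without_vowels longest_substring_without_vowels longest_substring_without_vowels_alt
  rw [pvFoldA s.toList 0 0 le_rfl le_rfl, pvGoB_eq s.toList.length s.toList le_rfl 0 le_rfl]
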